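-- pv_equiv track=rewrite | github.com/yuzhou-xing/knowledge | data_process/check_angle_square_bucket_print_error.py | check_auth
-- ===== SOURCE A (Python) =====
-- def check_auth(Correct_tag,Error_tag):
--     recode_auth_list = []
--     single_file_tag= []
--     correct_auth_tag  = ["<OL>","</OL>","<disfluency>", "</disfluency>","<PName>", "</PName>", "</NE>", "<NE:name>", "</NE:name>", "<NE>","<UNKNOWN/>","<SN/>","<FILL/>","<CNOISE/>","<ST/>","<BA/>","<FILLlaugh/>","<FL/>","<PII/>","<FL>"]
--     for tag_format,tag_list in Correct_tag.items():
--         for single_tag_detail in tag_list: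
--             if single_tag_detail not in correct_auth_tag:
--                 recode_auth_list.append(single_tag_detail)
--             single_file_tag.append(single_tag_detail)
--     for tag_format,tag_list in Error_tag.items():
--         for single_tag_detail in tag_list:
--             if single_tag_detail not in correct_auth_tag:
--                 recode_auth_list.append(single_tag_detail)
--             single_file_tag.append(single_tag_detail)
--     return recode_auth_list,single_file_tag
-- ===== SOURCE B (Python) =====
-- _AUTH = ["<OL>","</OL>","<disfluency>", "</disfluency>","<PName>", "</PName>", "</NE>", "<NE:name>", "</NE:name>", "<NE>","<UNKNOWN/>","<SN/>","<FILL/>","<CNOISE/>","<ST/>","<BA/>","<FILLlaugh/>","<FL/>","<PII/>","<FL>"]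
--
-- def _solve(tags, lo, hi):
--     """Divide and conquer over tags[lo:hi]: returns (unauthorized, all) for that range."""
--     if hi - lo == 0:
--         return [], []
--     if hi - lo == 1:
--         t = tags[lo]
--         return ([] if t in _AUTH else [t]), [t]
--     mid = (lo + hi) // 2
--     b1, s1 = _solve(tags, lo, mid)
--     b2, s2 = _solve(tags, mid, hi)
--     return b1 + b2, s1 + s2
--
-- def check_auth(Correct_tag, Error_tag):
--     tags = []
--     for v in Correct_tag.values():
--         tags += v
--     for v in Error_tag.values():
--         tags += v
--     return _solve(tags, 0, len(tags))
-- ===== Notes on version B (the rewrite author's own statement) =====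
-- stated objective: alternative
-- what changed: Replaces A's single interleaved left-to-right pass with two appending accumulators by a divide-and-conquer recursion: flatten the tags, then recursively split the range in half, solve each half, and merge the (unauthorized, all) pairs by concatenation.
import Mathlib
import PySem

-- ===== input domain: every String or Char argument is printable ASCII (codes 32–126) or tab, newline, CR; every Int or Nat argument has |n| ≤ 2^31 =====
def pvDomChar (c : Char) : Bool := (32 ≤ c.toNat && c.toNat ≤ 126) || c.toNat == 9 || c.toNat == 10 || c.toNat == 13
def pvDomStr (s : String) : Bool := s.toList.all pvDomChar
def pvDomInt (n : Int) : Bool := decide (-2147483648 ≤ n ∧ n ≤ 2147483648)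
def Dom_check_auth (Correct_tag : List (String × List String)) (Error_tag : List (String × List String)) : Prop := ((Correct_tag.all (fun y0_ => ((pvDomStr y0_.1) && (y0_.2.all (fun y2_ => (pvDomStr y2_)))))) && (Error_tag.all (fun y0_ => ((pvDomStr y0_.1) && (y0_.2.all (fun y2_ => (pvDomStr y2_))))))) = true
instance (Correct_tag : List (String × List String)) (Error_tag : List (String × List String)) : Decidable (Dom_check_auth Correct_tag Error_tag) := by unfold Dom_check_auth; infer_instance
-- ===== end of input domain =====

-- B replaces A's interleaved two-accumulator pass with flatten + divide-and-conquer
-- over index ranges, merging (unauthorized, all) pairs by concatenation; objective: alternative.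


-- the correct_auth_tag constant of A (also _AUTH of B)
def correctAuthTag : List String := ["<OL>","</OL>","<disfluency>", "</disfluency>","<PName>", "</PName>", "</NE>", "<NE:name>", "</NE:name>", "<NE>","<UNKNOWN/>","<SN/>","<FILL/>","<CNOISE/>","<ST/>","<BA/>","<FILLlaugh/>","<FL/>","<PII/>","<FL>"]

-- ===== PORT A =====
-- one interleaved pass: for each dict item, for each tag, conditionally append to
-- recode_auth_list and always append to single_file_tag
def check_auth (Correct_tag : List (String × List String)) (Error_tag : List (String × List String)) : List String × List String :=
  let step : (List String × List String) → String → (List String × List String) :=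
    fun st t =>
      (if correctAuthTag.contains t then st.1 else st.1 ++ [t], st.2 ++ [t])
  let outer : (List String × List String) → (String × List String) → (List String × List String) :=
    fun st p => p.2.foldl step st
  let st1 := Correct_tag.foldl outer ([], [])
  let st2 := Error_tag.foldl outer st1
  (st2.1, st2.2)

-- ===== PORT B =====
-- _solve of Source B: divide and conquer on a tag range; Source B's index pair (lo, hi) over the
-- flat list becomes the sublist itself, its tags[lo:mid] / tags[mid:hi] become take/drop
-- at the midpoint
def solveTags : List String → List String × List String
  | [] => ([], [])
  | [t] => (if correctAuthTag.contains t then [] else [t], [t])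
  | a :: b :: rest =>
    let l := a :: b :: rest
    let k := l.length / 2
    let p1 := solveTags (l.take k)
    let p2 := solveTags (l.drop k)
    (p1.1 ++ p2.1, p1.2 ++ p2.2)
termination_by l => l.length
decreasing_by
  · simp only [k, List.length_take, List.length_cons]; omega
  · simp only [k, List.length_drop, List.length_cons]; omega

-- check_auth of Source B: flatten the value-lists of both dicts, then solve the whole range
def check_auth_alt (Correct_tag : List (String × List String)) (Error_tag : List (String × List String)) : List String × List String :=
  let tags1 := Correct_tag.foldl (fun acc p => acc ++ p.2) []
  let tags := Error_tag.foldl (fun acc p => acc ++ p.2) tags1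
  solveTags tags

-- ===== PRECONDITION & SPEC =====
def Spec_check_auth (Correct_tag : List (String × List String)) (Error_tag : List (String × List String)) (out : List String × List String) : Prop := out = check_auth_alt Correct_tag Error_tag
instance (Correct_tag : List (String × List String)) (Error_tag : List (String × List String)) (out : List String × List String) : Decidable (Spec_check_auth Correct_tag Error_tag out) := by unfold Spec_check_auth; infer_instance

-- ===== CLAIM (what is proved, stated in full; the proofs are below) =====
def Claim_equal_check_auth : Prop := ∀ (Correct_tag : List (String × List String)) (Error_tag : List (String × List String)), Dom_check_auth Correct_tag Error_tag → Spec_check_auth Correct_tag Error_tag (check_auth Correct_tag Error_tag)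

-- ===== LEMMAS AND PROOFS =====

-- A's inner tag loop appends the filtered tags / all tags to the two accumulators
theorem inner_foldl (l r s : List String) :
    l.foldl (fun st t => (if correctAuthTag.contains t then st.1 else st.1 ++ [t], st.2 ++ [t])) (r, s)
      = (r ++ l.filter (fun t => !correctAuthTag.contains t), s ++ l) := by
  induction l generalizing r s with
  | nil => simp
  | cons h t ih =>
    simp only [List.foldl_cons, List.filter_cons]
    by_cases hc : correctAuthTag.contains h
    · simp only [hc, if_pos, Bool.not_true, ih]; simp
    · simp only [hc, Bool.not_false, ih]; simp

-- A's outer dict loop flattens all value-lists into both accumulators accordingly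
theorem outer_foldl (L : List (String × List String)) (r s : List String) :
    L.foldl (fun st p => p.2.foldl (fun st t => (if correctAuthTag.contains t then st.1 else st.1 ++ [t], st.2 ++ [t])) st) (r, s)
      = (r ++ (L.flatMap (fun p => p.2)).filter (fun t => !correctAuthTag.contains t),
         s ++ L.flatMap (fun p => p.2)) := by
  induction L generalizing r s with
  | nil => simp
  | cons h t ih =>
    simp only [List.foldl_cons, inner_foldl, ih, List.flatMap_cons, List.filter_append,
      List.append_assoc]

-- B's flattening loop equals acc ++ flatMap
theorem flatten_foldl (L : List (String × List String)) (acc : List String) :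
    L.foldl (fun acc p => acc ++ p.2) acc = acc ++ L.flatMap (fun p => p.2) := by
  induction L generalizing acc with
  | nil => simp
  | cons h t ih => simp [List.foldl_cons, ih]

-- the divide-and-conquer recursion computes (filter, identity)
theorem solveTags_eq (l : List String) :
    solveTags l = (l.filter (fun t => !correctAuthTag.contains t), l) := by
  induction l using solveTags.induct with
  | case1 => simp [solveTags]
  | case2 t =>
    by_cases hc : t ∈ correctAuthTag
    · simp [solveTags, hc]
    · simp [solveTags, hc]
  | case3 a b rest l k ihT ihD =>
    simp only [l, k] at ihT ihD
    rw [solveTags]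
    simp only [ihT, ihD]
    rw [← List.filter_append, List.take_append_drop]

-- ===== VERDICT (by name: the statement is the Claim_ definition above) =====
theorem check_auth_spec : Claim_equal_check_auth := by
  intro C E _
  show check_auth C E = check_auth_alt C E
  simp only [check_auth, check_auth_alt, outer_foldl, flatten_foldl, solveTags_eq,
    List.nil_append, List.filter_append]
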